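-- pv_equiv track=rewrite | github.com/santoshuppala/trading_hub | scripts/watchdog.py | extract_traceback
-- ===== SOURCE A (Python) =====
-- def extract_traceback(stderr_text: str) -> str:
--     """Extract the last traceback from stderr output."""
--     # Find all tracebacks
--     tb_starts = [i for i, line in enumerate(stderr_text.split('\n'))
--                  if line.strip().startswith('Traceback')]
--     if not tb_starts:
--         return stderr_text[-2000:]  # last 2000 chars as fallback
--
--     lines = stderr_text.split('\n')
--     last_tb_start = tb_starts[-1]
--     return '\n'.join(lines[last_tb_start:])
-- ===== SOURCE B (Python) =====
-- def extract_traceback(stderr_text: str) -> str: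
--     """Extract the last traceback from stderr output."""
--     lines = stderr_text.split('\n')
--     for i in range(len(lines) - 1, -1, -1):
--         if lines[i].strip().startswith('Traceback'):
--             return '\n'.join(lines[i:])
--     return stderr_text[-2000:]  # last 2000 chars as fallback
-- ===== Notes on version B (the rewrite author's own statement) =====
-- stated objective: simpler
-- what changed: Instead of building the full list of all traceback-start indices via enumerate+filter and then splitting the text a second time, B splits once and scans the lines backwards, returning at the first (i.e. last) traceback header it meets.
import Mathlib
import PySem

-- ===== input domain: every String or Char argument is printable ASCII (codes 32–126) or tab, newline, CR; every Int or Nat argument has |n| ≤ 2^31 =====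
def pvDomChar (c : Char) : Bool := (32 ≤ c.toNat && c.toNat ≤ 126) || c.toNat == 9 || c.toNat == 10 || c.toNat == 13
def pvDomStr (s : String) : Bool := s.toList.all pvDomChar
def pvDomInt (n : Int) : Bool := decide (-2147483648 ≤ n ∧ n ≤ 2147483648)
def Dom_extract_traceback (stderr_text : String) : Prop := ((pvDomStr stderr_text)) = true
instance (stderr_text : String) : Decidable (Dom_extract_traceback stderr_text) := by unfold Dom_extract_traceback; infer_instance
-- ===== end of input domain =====

-- B replaces A's enumerate+filter index list (and second split) by one split and an
-- early-terminating backward scan for the last 'Traceback' header line (objective: simpler).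

-- s.split('\n'): sep ≠ "", so PySem.Str.split? always returns some; getD [] is exact here
def pySplitNL (s : String) : List String := (PySem.Str.split? s "\n").getD []

-- ===== PORT A =====
def extract_traceback (stderr_text : String) : String :=
  let tb_starts : List Int :=
    ((PySem.List.enumerate (pySplitNL stderr_text) 0).filter
      (fun il => PySem.Str.startswith (PySem.Str.strip il.2) "Traceback")).map Prod.fst
  if tb_starts = [] then
    PySem.Str.slice stderr_text (some (-2000)) none
  else
    let lines := pySplitNL stderr_text
    let last_tb_start := (PySem.List.pyGet? tb_starts (-1)).getD 0  -- tb_starts ≠ [], so pyGet? is some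
    PySem.Str.join "\n" (PySem.List.slice lines (some last_tb_start) none)

-- ===== PORT B =====
-- the descending-index for-loop of Source B: walk the reversed line list, the index counting down
def altScan : List String → Nat → Option Nat
  | [], _ => none
  | l :: rest, i =>
    if PySem.Str.startswith (PySem.Str.strip l) "Traceback" then some i
    else altScan rest (i - 1)

def extract_traceback_alt (stderr_text : String) : String :=
  let lines := pySplitNL stderr_text
  match altScan lines.reverse (lines.length - 1) with
  | some i => PySem.Str.join "\n" (PySem.List.slice lines (some (i : Int)) none)
  | none => PySem.Str.slice stderr_text (some (-2000)) none

-- ===== PRECONDITION & SPEC =====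
def Spec_extract_traceback (stderr_text : String) (out : String) : Prop := out = extract_traceback_alt stderr_text
instance (stderr_text : String) (out : String) : Decidable (Spec_extract_traceback stderr_text out) := by unfold Spec_extract_traceback; infer_instance

-- ===== CLAIM (what is proved, stated in full; the proofs are below) =====
def Claim_equal_extract_traceback : Prop := ∀ (stderr_text : String), Dom_extract_traceback stderr_text → Spec_extract_traceback stderr_text (extract_traceback stderr_text)

-- ===== LEMMAS AND PROOFS =====

-- the backward scan finds exactly the last index of A's enumerate+filter index list
theorem altScan_eq_getLast? (L : List String) :
    (((PySem.List.enumerate L 0).filter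
        (fun il => PySem.Str.startswith (PySem.Str.strip il.2) "Traceback")).map Prod.fst).getLast?
      = (altScan L.reverse (L.length - 1)).map Int.ofNat := by
  induction L using List.reverseRecOn with
  | nil => rfl
  | append_singleton L a ih =>
    have hlen : (L ++ [a]).length - 1 = L.length := by simp
    rw [List.reverse_append, List.reverse_singleton, List.singleton_append, hlen, altScan,
      PySem.List.enumerate_append]
    have henum : PySem.List.enumerate [a] (0 + (L.length : Int)) = [((L.length : Int), a)] := by
      rw [PySem.List.enumerate_cons, PySem.List.enumerate_nil]
      norm_num
    rw [henum, List.filter_append, List.map_append]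
    by_cases h : PySem.Chars.startswith (PySem.Chars.strip a.toList)
        ['T','r','a','c','e','b','a','c','k'] = true
    · simp [h]
    · simp [h]
      simpa using ih

theorem extract_traceback_eq_alt (stderr_text : String) :
    extract_traceback stderr_text = extract_traceback_alt stderr_text := by
  simp only [extract_traceback, extract_traceback_alt]
  set L := pySplitNL stderr_text with hL
  have key := altScan_eq_getLast? L
  cases hscan : altScan L.reverse (L.length - 1) with
  | none =>
    rw [hscan, Option.map_none] at key
    have hnil := List.getLast?_eq_none_iff.mp key
    rw [hnil]
    simp
  | some k =>
    rw [hscan, Option.map_some] at key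
    have hne : (((PySem.List.enumerate L 0).filter
        (fun il => PySem.Str.startswith (PySem.Str.strip il.2) "Traceback")).map Prod.fst) ≠ [] := by
      intro hcon; rw [hcon] at key; simp at key
    rw [if_neg hne, PySem.List.pyGet?_neg_one, key]
    simp

-- ===== VERDICT (by name: the statement is the Claim_ definition above) =====
theorem extract_traceback_spec : Claim_equal_extract_traceback := by
  intro s _
  exact extract_traceback_eq_alt s
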